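-- pv_equiv track=rewrite | github.com/CivetStudio/MAML_Pilot | dev/Refactor/Func/formatDate.py | get_time_description
-- ===== SOURCE A (Python) =====
-- def get_time_description(hour):
--     if hour is None:
--         return ""
--     else:
--         time_intervals = [
--             {"min": 0, "max": 5, "text": "凌晨"},
--             {"min": 6, "max": 11, "text": "上午"},
--             {"min": 12, "max": 13, "text": "中午"},
--             {"min": 14, "max": 17, "text": "下午"},
--             {"min": 18, "max": 19, "text": "傍晚"},
--             {"min": 20, "max": 24, "text": "晚上"}
--         ]
--         for interval in time_intervals:
--             if interval["min"] <= hour <= interval["max"]: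
--                 return interval["text"]
-- ===== SOURCE B (Python) =====
-- _INTERVALS = [
--     (0, 5, "凌晨"),
--     (6, 11, "上午"),
--     (12, 13, "中午"),
--     (14, 17, "下午"),
--     (18, 19, "傍晚"),
--     (20, 24, "晚上"),
-- ]
-- _TABLE = {h: text for lo, hi, text in _INTERVALS for h in range(lo, hi + 1)}
--
-- def get_time_description(hour):
--     if hour is None:
--         return ""
--     return _TABLE.get(hour)
-- ===== Notes on version B (the rewrite author's own statement) =====
-- stated objective: idiomatic
-- what changed: B precomputes a module-level hour->label dict from the interval list and answers with one keyed lookup, removing A's per-call interval-scanning loop.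
-- outside the precondition, e.g. on get_time_description(25): A returns None, B returns None; on get_time_description(-1): A returns None, B returns None
import Mathlib
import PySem

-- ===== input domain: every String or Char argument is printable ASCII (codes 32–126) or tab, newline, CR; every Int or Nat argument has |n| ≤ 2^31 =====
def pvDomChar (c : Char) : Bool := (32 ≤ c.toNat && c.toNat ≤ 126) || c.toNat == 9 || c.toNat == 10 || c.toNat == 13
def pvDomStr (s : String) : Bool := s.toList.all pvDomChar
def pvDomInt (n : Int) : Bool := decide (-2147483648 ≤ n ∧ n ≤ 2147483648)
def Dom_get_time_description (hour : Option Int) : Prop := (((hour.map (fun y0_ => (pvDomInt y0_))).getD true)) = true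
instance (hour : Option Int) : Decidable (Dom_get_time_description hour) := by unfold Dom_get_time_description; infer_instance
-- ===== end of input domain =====

-- B replaces A's per-call interval scan with a precomputed hour->label dict and a single keyed lookup (idiomatic).
-- Pre_ excludes hours outside [0,24] (for hour = some h), where Python A falls off the loop and returns None, not a string.


-- ===== PORT A =====
-- the for-loop over time_intervals: first interval with min ≤ hour ≤ max wins; "" stands for Python's fall-off None (outside Pre_)
def pvScanA (h : Int) : List (Int × Int × String) → String
  | [] => ""
  | (lo, hi, text) :: rest => if lo ≤ h ∧ h ≤ hi then text else pvScanA h rest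

def get_time_description (hour : Option Int) : String :=
  match hour with
  | none => ""
  | some h =>
    let time_intervals : List (Int × Int × String) :=
      [(0, 5, "凌晨"), (6, 11, "上午"), (12, 13, "中午"),
       (14, 17, "下午"), (18, 19, "傍晚"), (20, 24, "晚上")]
    pvScanA h time_intervals

-- ===== PORT B =====
def pvIntervalsB : List (Int × Int × String) :=
  [(0, 5, "凌晨"), (6, 11, "上午"), (12, 13, "中午"),
   (14, 17, "下午"), (18, 19, "傍晚"), (20, 24, "晚上")]

-- _TABLE: dict comprehension over each interval's range(lo, hi+1)
def pvTableB : PySem.Dict Int String :=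
  pvIntervalsB.foldl
    (fun d p => (PySem.List.pyRange p.1 (p.2.1 + 1) 1).foldl (fun d h => d.insert h p.2.2) d)
    PySem.Dict.empty

def get_time_description_alt (hour : Option Int) : String :=
  match hour with
  | none => ""
  | some h => (pvTableB.get? h).getD ""   -- "" stands for Python's None on a missing key (outside Pre_)

-- ===== PRECONDITION & SPEC =====
-- Pre_ excludes some h with h < 0 or h > 24: there A returns Python None (no string value of the declared type).
def Pre_get_time_description (hour : Option Int) : Prop :=
  ∀ h, hour = some h → 0 ≤ h ∧ h ≤ 24
instance (hour : Option Int) : Decidable (Pre_get_time_description hour) := by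
  unfold Pre_get_time_description; infer_instance
def pvWitness_get_time_description : Option Int := some 7
def Spec_get_time_description (hour : Option Int) (out : String) : Prop := out = get_time_description_alt hour
instance (hour : Option Int) (out : String) : Decidable (Spec_get_time_description hour out) := by unfold Spec_get_time_description; infer_instance

-- ===== CLAIM (what is proved, stated in full; the proofs are below) =====
def Claim_equal_get_time_description : Prop := ∀ (hour : Option Int), Dom_get_time_description hour → Pre_get_time_description hour → Spec_get_time_description hour (get_time_description hour)

-- ===== LEMMAS AND PROOFS =====

-- ===== VERDICT (by name: the statement is the Claim_ definition above) =====
theorem get_time_description_spec : Claim_equal_get_time_description := by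
  intro hour _ hpre
  unfold Spec_get_time_description
  match hour with
  | none => rfl
  | some h =>
    obtain ⟨h0, h24⟩ := hpre h rfl
    interval_cases h <;> decide
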